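-- pv_equiv track=rewrite | github.com/AtticusAlan/PIcPickGame | pic_pick_1p.py | genTail
-- ===== SOURCE A (Python) =====
-- def genTail(head_row, head_column, dir):
--     tail = []
--     # generate tail grids based on different direction
--     # arrow pointing up:
--     if dir == 'up':
--         for i in range(1,3):
--             tail.append((head_row + i, head_column + i))
--             tail.append((head_row + i, head_column - i))
--         for j in range(1,5):
--             tail.append((head_row + j, head_column))
--     # arrow pointing down:
--     elif dir == 'down':
--         for i in range(1,3):
--             tail.append((head_row - i, head_column + i))
--             tail.append((head_row - i, head_column - i))
--         for j in range(1,5):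
--             tail.append((head_row - j, head_column))
--     elif dir == 'right':
--         for i in range(1,3):
--             tail.append((head_row - i, head_column - i))
--             tail.append((head_row + i, head_column - i))
--         for j in range(1,5):
--             tail.append((head_row, head_column - j))
--     else: # left
--         for i in range(1,3):
--             tail.append((head_row - i, head_column + i))
--             tail.append((head_row + i, head_column + i))
--         for j in range(1,5):
--             tail.append((head_row, head_column + j))
--     return tail
-- ===== SOURCE B (Python) =====
-- def genTail(head_row, head_column, dir):
--     # One canonical tail shape (arrow pointing LEFT): two diagonal wing pairs,
--     # then a 4-cell shaft.  Each direction is this same shape pushed through a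
--     # linear symmetry transform (rotation/reflection), then translated to head.
--     base = []
--     for i in (1, 2):
--         base += [(-i, i), (i, i)]
--     base += [(0, j) for j in range(1, 5)]
--     if dir == 'up':
--         f = lambda r, c: (c, -r)       # rotate the left shape to point up
--     elif dir == 'down':
--         f = lambda r, c: (-c, -r)      # reflect+rotate: point down
--     elif dir == 'right':
--         f = lambda r, c: (r, -c)       # mirror horizontally: point right
--     else:  # left (default)
--         f = lambda r, c: (r, c)
--     return [(head_row + a, head_column + b) for (a, b) in (f(r, c) for (r, c) in base)]
-- ===== Notes on version B (the rewrite author's own statement) =====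
-- stated objective: alternative
-- what changed: B builds one canonical left-pointing tail shape and derives each direction by applying a linear symmetry transform (rotation/reflection) to it, instead of A's four separate per-direction append-loop blocks.
import Mathlib
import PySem

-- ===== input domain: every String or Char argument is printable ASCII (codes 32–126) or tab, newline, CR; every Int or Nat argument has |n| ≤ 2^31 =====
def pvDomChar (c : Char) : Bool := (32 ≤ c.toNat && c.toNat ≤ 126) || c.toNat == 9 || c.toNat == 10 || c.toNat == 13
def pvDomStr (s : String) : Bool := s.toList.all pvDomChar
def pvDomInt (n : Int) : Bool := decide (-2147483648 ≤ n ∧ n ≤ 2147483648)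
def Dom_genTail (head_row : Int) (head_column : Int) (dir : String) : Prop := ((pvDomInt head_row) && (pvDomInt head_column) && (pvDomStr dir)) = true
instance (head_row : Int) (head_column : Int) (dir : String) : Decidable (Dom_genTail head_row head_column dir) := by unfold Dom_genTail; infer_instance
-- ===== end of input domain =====

-- ===== PORT A =====
-- B builds one canonical left-pointing shape and maps each direction through a
-- linear symmetry transform, instead of A's four per-direction loop blocks (objective: alternative).
def genTail (head_row : Int) (head_column : Int) (dir : String) : List (Int × Int) :=
  if dir == "up" then
    let tail := (PySem.List.pyRange 1 3 1).foldl (fun t i =>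
      (t ++ [(head_row + i, head_column + i)]) ++ [(head_row + i, head_column - i)]) []
    (PySem.List.pyRange 1 5 1).foldl (fun t j => t ++ [(head_row + j, head_column)]) tail
  else if dir == "down" then
    let tail := (PySem.List.pyRange 1 3 1).foldl (fun t i =>
      (t ++ [(head_row - i, head_column + i)]) ++ [(head_row - i, head_column - i)]) []
    (PySem.List.pyRange 1 5 1).foldl (fun t j => t ++ [(head_row - j, head_column)]) tail
  else if dir == "right" then
    let tail := (PySem.List.pyRange 1 3 1).foldl (fun t i =>
      (t ++ [(head_row - i, head_column - i)]) ++ [(head_row + i, head_column - i)]) []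
    (PySem.List.pyRange 1 5 1).foldl (fun t j => t ++ [(head_row, head_column - j)]) tail
  else -- left
    let tail := (PySem.List.pyRange 1 3 1).foldl (fun t i =>
      (t ++ [(head_row - i, head_column + i)]) ++ [(head_row + i, head_column + i)]) []
    (PySem.List.pyRange 1 5 1).foldl (fun t j => t ++ [(head_row, head_column + j)]) tail

-- ===== PORT B =====
def genTail_alt (head_row : Int) (head_column : Int) (dir : String) : List (Int × Int) :=
  let base : List (Int × Int) :=
    (([] : List (Int × Int)) ++ [(-1, 1), (1, 1)] ++ [(-2, 2), (2, 2)])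
      ++ (PySem.List.pyRange 1 5 1).map (fun j => ((0 : Int), j))
  let f : Int → Int → Int × Int :=
    if dir == "up" then fun r c => (c, -r)
    else if dir == "down" then fun r c => (-c, -r)
    else if dir == "right" then fun r c => (r, -c)
    else fun r c => (r, c)
  (base.map (fun p => f p.1 p.2)).map (fun q => (head_row + q.1, head_column + q.2))

-- ===== PRECONDITION & SPEC =====
def Spec_genTail (head_row : Int) (head_column : Int) (dir : String) (out : List (Int × Int)) : Prop := out = genTail_alt head_row head_column dir
instance (head_row : Int) (head_column : Int) (dir : String) (out : List (Int × Int)) : Decidable (Spec_genTail head_row head_column dir out) := by unfold Spec_genTail; infer_instance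

-- ===== CLAIM =====
def Claim_equal_genTail : Prop := ∀ (head_row : Int) (head_column : Int) (dir : String), Dom_genTail head_row head_column dir → Spec_genTail head_row head_column dir (genTail head_row head_column dir)

-- ===== LEMMAS AND PROOFS =====
theorem genTail_eq_alt (head_row : Int) (head_column : Int) (dir : String) :
    genTail head_row head_column dir = genTail_alt head_row head_column dir := by
  unfold genTail genTail_alt
  by_cases h1 : dir == "up" <;> by_cases h2 : dir == "down" <;> by_cases h3 : dir == "right" <;>
    simp [h1, h2, h3, PySem.List.pyRange, List.range_succ, sub_eq_add_neg]

-- ===== VERDICT =====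
theorem genTail_spec : Claim_equal_genTail := by
  intro r c d _
  unfold Spec_genTail
  exact genTail_eq_alt r c d
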